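-- pv_equiv track=rewrite | github.com/LJKelly3141/course-scheduler | backend/app/api/routes/analytics.py | _classify_pattern
-- ===== SOURCE A (Python) =====
-- def _parse_pattern_days(pattern: str) -> list:
--     """Parse meeting pattern like 'M W F' or 'T TH' into day codes."""
--     tokens = pattern.upper().split()
--     days: list = []
--     for t in tokens:
--         if t == "TH":
--             days.append("Th")
--         elif t in ("M", "T", "W", "F", "S", "U"):
--             days.append(t if t != "T" else "T")
--             if t == "T":
--                 days[-1] = "T"
--         elif len(t) > 1:
--             i = 0
--             while i < len(t):
--                 if i + 1 < len(t) and t[i:i + 2] == "TH":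
--                     days.append("Th")
--                     i += 2
--                 elif t[i] in "MTWFSU":
--                     days.append(t[i])
--                     i += 1
--                 else:
--                     i += 1
--     return days
--
-- def _classify_pattern(pattern: str) -> str:
--     """Classify a meeting pattern as 'MWF' or 'TTh' type."""
--     days = _parse_pattern_days(pattern)
--     has_mwf = any(d in ("M", "W", "F") for d in days)
--     has_tth = any(d in ("T", "Th") for d in days)
--     if has_mwf and not has_tth:
--         return "MWF"
--     if has_tth and not has_mwf:
--         return "TTh"
--     if has_mwf:
--         return "MWF"
--     return "TTh"
-- ===== SOURCE B (Python) =====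
-- def _classify_pattern(pattern: str) -> str:
--     """Classify a meeting pattern as 'MWF' or 'TTh' type."""
--     # Every M/W/F character of the uppercased pattern ends up as an MWF day in A's
--     # day list (the "TH" grouping only ever consumes 'T' and 'H'), and A's final
--     # branch chain collapses to: 'MWF' iff has_mwf.  So one membership check suffices.
--     return "MWF" if any(c in pattern.upper() for c in "MWF") else "TTh"
-- ===== Notes on version B (the rewrite author's own statement) =====
-- stated objective: simpler
-- what changed: Replaced the tokenize-into-a-day-code-list-plus-two-scans pipeline with a single direct membership test on the uppercased string (the result only depends on whether an M/W/F character occurs; has_tth never influences it), building no intermediate list at all.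
import Mathlib
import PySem

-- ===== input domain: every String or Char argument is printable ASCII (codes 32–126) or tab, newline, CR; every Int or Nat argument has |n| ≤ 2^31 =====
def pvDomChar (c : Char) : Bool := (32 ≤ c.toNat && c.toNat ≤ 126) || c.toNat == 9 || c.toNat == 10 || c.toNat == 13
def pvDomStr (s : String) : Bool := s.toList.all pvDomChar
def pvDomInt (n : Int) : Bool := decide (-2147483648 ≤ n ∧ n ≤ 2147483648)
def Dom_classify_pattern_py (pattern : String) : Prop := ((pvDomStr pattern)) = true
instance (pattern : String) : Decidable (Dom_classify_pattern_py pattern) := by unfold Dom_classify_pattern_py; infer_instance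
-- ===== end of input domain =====

-- B replaces A's tokenize-into-day-list-then-scan pipeline by one direct membership
-- check on the uppercased string ('MWF' iff it contains 'M', 'W' or 'F'); objective: simpler.

-- ===== PORT A =====
-- inner while-loop of _parse_pattern_days for tokens with len(t) > 1;
-- t[i:i+2] with 0 ≤ i is exactly (t.drop i).take 2 (PySem.List.slice_toNat);
-- Python's `t[i] in "MTWFSU"` for the single char t[i] is list membership.
def pvInner (t : List Char) (i : Nat) (days : List (List Char)) : List (List Char) :=
  if h : i < t.length then
    if i + 1 < t.length ∧ (t.drop i).take 2 = ['T', 'H'] then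
      pvInner t (i + 2) (days ++ [['T', 'h']])
    else if t[i] ∈ (['M', 'T', 'W', 'F', 'S', 'U'] : List Char) then
      pvInner t (i + 1) (days ++ [[t[i]]])
    else
      pvInner t (i + 1) days
  else days
termination_by t.length - i

-- the body of the `for t in tokens` loop of _parse_pattern_days
def pvStep (days : List (List Char)) (t : List Char) : List (List Char) :=
  if t = ['T', 'H'] then days ++ [['T', 'h']]
  else if t ∈ ([['M'], ['T'], ['W'], ['F'], ['S'], ['U']] : List (List Char)) then
    -- days.append(t if t != "T" else "T"); if t == "T": days[-1] = "T"
    let days' := days ++ [if t = ['T'] then ['T'] else t]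
    if t = ['T'] then days'.dropLast ++ [['T']] else days'
  else if t.length > 1 then pvInner t 0 days
  else days

-- _parse_pattern_days (day codes kept as List Char)
def pvParseDays (s : List Char) : List (List Char) :=
  (PySem.Chars.split₀ (PySem.Chars.upper s)).foldl pvStep []

-- d in ("M", "W", "F")
def pvIsMWF (d : List Char) : Bool := decide (d ∈ ([['M'], ['W'], ['F']] : List (List Char)))

-- d in ("T", "Th")
def pvIsTTh (d : List Char) : Bool := decide (d ∈ ([['T'], ['T', 'h']] : List (List Char)))

def classify_pattern_py (pattern : String) : String :=
  let days := pvParseDays pattern.toList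
  let has_mwf := days.any pvIsMWF
  let has_tth := days.any pvIsTTh
  if has_mwf && !has_tth then "MWF"
  else if has_tth && !has_mwf then "TTh"
  else if has_mwf then "MWF"
  else "TTh"

-- ===== PORT B =====
-- return "MWF" if any(c in pattern.upper() for c in "MWF") else "TTh"
def classify_pattern_py_alt (pattern : String) : String :=
  if (['M', 'W', 'F'] : List Char).any
      (fun c => PySem.Chars.isIn [c] (PySem.Chars.upper pattern.toList)) then "MWF"
  else "TTh"

-- ===== PRECONDITION & SPEC =====
def Spec_classify_pattern_py (pattern : String) (out : String) : Prop := out = classify_pattern_py_alt pattern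
instance (pattern : String) (out : String) : Decidable (Spec_classify_pattern_py pattern out) := by unfold Spec_classify_pattern_py; infer_instance

-- ===== CLAIM (what is proved, stated in full; the proofs are below) =====
def Claim_equal_classify_pattern_py : Prop := ∀ (pattern : String), Dom_classify_pattern_py pattern → Spec_classify_pattern_py pattern (classify_pattern_py pattern)

-- ===== LEMMAS AND PROOFS =====

lemma pvDrop_pair {t : List Char} {i : Nat} (h : (t.drop i).take 2 = ['T', 'H']) :
    t.drop i = 'T' :: 'H' :: t.drop (i + 2) := by
  have := (List.take_append_drop 2 (t.drop i)).symm
  rw [h] at this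
  simpa [List.drop_drop, Nat.add_comm] using this

-- the inner scan appends an M/W/F day iff an M/W/F char occurs at position ≥ i
lemma pvInner_mwf (t : List Char) (i : Nat) (days : List (List Char)) :
    (pvInner t i days).any pvIsMWF = true ↔
      days.any pvIsMWF = true ∨ ∃ c ∈ t.drop i, c ∈ (['M', 'W', 'F'] : List Char) := by
  fun_induction pvInner t i days with
  | case1 i days h hTH ih =>
    rw [ih, pvDrop_pair hTH.2]
    simp [pvIsMWF]
  | case2 i days h hTH hmem ih =>
    rw [ih, List.drop_eq_getElem_cons h]
    simp only [List.any_append, List.any_cons, List.any_nil, Bool.or_false, Bool.or_eq_true,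
      List.mem_cons, pvIsMWF, List.not_mem_nil, decide_eq_true_eq,
      List.cons.injEq, and_true, or_false] at *
    aesop
  | case3 i days h hTH hmem ih =>
    rw [ih, List.drop_eq_getElem_cons h]
    simp only [List.mem_cons, List.not_mem_nil, or_false] at *
    constructor
    · rintro (h' | ⟨c, hc, hcm⟩)
      · exact Or.inl h'
      · exact Or.inr ⟨c, Or.inr hc, hcm⟩
    · rintro (h' | ⟨c, rfl | hc, hcm⟩)
      · exact Or.inl h'
      · exact absurd (by tauto) hmem
      · exact Or.inr ⟨c, hc, hcm⟩
  | case4 i days h =>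
    have : t.drop i = [] := List.drop_eq_nil_of_le (by omega)
    simp [this]

-- one token contributes an M/W/F day iff it contains an M/W/F char
lemma pvStep_mwf (days : List (List Char)) (t : List Char) :
    (pvStep days t).any pvIsMWF = true ↔
      days.any pvIsMWF = true ∨ ∃ c ∈ t, c ∈ (['M', 'W', 'F'] : List Char) := by
  unfold pvStep
  by_cases h1 : t = ['T', 'H']
  · subst h1; simp [pvIsMWF]
  rw [if_neg h1]
  by_cases h2 : t ∈ ([['M'], ['T'], ['W'], ['F'], ['S'], ['U']] : List (List Char))
  · rw [if_pos h2]
    simp only [List.mem_cons, List.not_mem_nil, or_false] at h2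
    rcases h2 with rfl | rfl | rfl | rfl | rfl | rfl <;> simp [pvIsMWF]
  rw [if_neg h2]
  by_cases h3 : t.length > 1
  · rw [if_pos h3, pvInner_mwf]; simp
  · rw [if_neg h3]
    match t, h3 with
    | [], _ => simp
    | [c], _ =>
      simp only [List.mem_cons, List.not_mem_nil, or_false] at h2
      constructor
      · exact Or.inl
      · rintro (h' | ⟨d, hd, hdm⟩)
        · exact h'
        · rcases List.mem_singleton.mp hd with rfl
          exact absurd (by rcases List.mem_cons.mp hdm with rfl | hdm <;> simp_all) h2
    | c :: d :: rest, h3 => exact absurd (by simp) h3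

lemma pvFoldl_mwf (tokens : List (List Char)) (days : List (List Char)) :
    ((tokens.foldl pvStep days).any pvIsMWF = true) ↔
      days.any pvIsMWF = true ∨ ∃ t ∈ tokens, ∃ c ∈ t, c ∈ (['M', 'W', 'F'] : List Char) := by
  induction tokens generalizing days with
  | nil => simp
  | cons t ts ih =>
    rw [List.foldl_cons, ih, pvStep_mwf]
    simp [or_assoc]

-- a non-whitespace char is in some token of s.split() iff it is in s
lemma pvSplitGo_mem (c : Char) (hc : PySem.Chars.isspace c = false) (s : List Char) :
    ∀ (cur : List Char) (acc : List (List Char)),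
      (∃ t ∈ PySem.Chars.split₀.go s cur acc, c ∈ t) ↔
        c ∈ s ∨ c ∈ cur ∨ ∃ t ∈ acc, c ∈ t := by
  induction s with
  | nil =>
    intro cur acc
    rw [PySem.Chars.split₀.go]
    split_ifs with h
    · simp [List.isEmpty_iff.mp h]
    · simp
      aesop
  | cons c' rest ih =>
    intro cur acc
    rw [PySem.Chars.split₀.go]
    by_cases hs : PySem.Chars.isspace c' = true
    · have hne : c ≠ c' := fun h => by rw [h] at hc; simp_all
      rw [if_pos hs]
      split_ifs with h
      · rw [ih]
        simp [hne, List.isEmpty_iff.mp h]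
      · rw [ih]
        simp [hne]
    · rw [if_neg hs, ih]
      simp
      aesop

lemma pvSplit₀_mem (c : Char) (hc : PySem.Chars.isspace c = false) (s : List Char) :
    (∃ t ∈ PySem.Chars.split₀ s, c ∈ t) ↔ c ∈ s := by
  rw [PySem.Chars.split₀, pvSplitGo_mem c hc]
  simp

-- A's has_mwf flag equals B's direct membership test
lemma pvHasMwf_eq (s : List Char) :
    (pvParseDays s).any pvIsMWF =
      (['M', 'W', 'F'] : List Char).any (fun c => PySem.Chars.isIn [c] (PySem.Chars.upper s)) := by
  rw [Bool.eq_iff_iff, pvParseDays, pvFoldl_mwf]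
  simp only [List.any_nil, Bool.false_eq_true, false_or, List.any_eq_true]
  constructor
  · rintro ⟨t, ht, c, hct, hcm⟩
    refine ⟨c, hcm, ?_⟩
    rw [PySem.Chars.isIn_iff_infix, List.singleton_infix_iff]
    exact (pvSplit₀_mem c (by fin_cases hcm <;> decide) _).1 ⟨t, ht, hct⟩
  · rintro ⟨c, hcm, hcu⟩
    rw [PySem.Chars.isIn_iff_infix, List.singleton_infix_iff] at hcu
    obtain ⟨t, ht, hct⟩ := (pvSplit₀_mem c (by fin_cases hcm <;> decide) _).2 hcu
    exact ⟨t, ht, c, hct, hcm⟩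

-- ===== VERDICT (by name: the statement is the Claim_ definition above) =====
theorem classify_pattern_py_spec : Claim_equal_classify_pattern_py := by
  intro pattern _
  show classify_pattern_py pattern = classify_pattern_py_alt pattern
  simp only [classify_pattern_py, classify_pattern_py_alt, pvHasMwf_eq]
  cases h1 : (['M', 'W', 'F'] : List Char).any
      (fun c => PySem.Chars.isIn [c] (PySem.Chars.upper pattern.toList)) <;>
    cases h2 : (pvParseDays pattern.toList).any pvIsTTh <;> simp
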